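-- pv_equiv track=rewrite | github.com/COLA-Laboratory/RNAInvBench | rna_design_algorithms/LMM/uti.py | mask_sequence
-- ===== SOURCE A (Python) =====
-- def mask_sequence(sequence, positions):
--     """
--     Masks specified positions in a given sequence with '<mask>'.
--
--     Args:
--     sequence (str): The original sequence.
--     positions (list of int): List of positions to mask.
--
--     Returns:
--     str: The sequence with specified positions replaced by '<mask>'.
--     """
--     # Convert the sequence to a list of characters for mutability
--     sequence_list = list(sequence)
--
--     # Loop through each specified position and replace with '<mask>'
--     for pos in positions:
--         if pos < len(sequence_list):  # Check if the position is within the sequence length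
--             sequence_list[pos] = '<mask>'
--         else:
--             raise IndexError("Position out of the sequence range")
--
--     # Join the list back into a string
--     masked_sequence = ''.join(sequence_list)
--     return masked_sequence
-- ===== SOURCE B (Python) =====
-- def mask_sequence(sequence, positions):
--     """
--     Returns sequence with each given position replaced by '<mask>'.
--
--     Positions are Python-style indices: negative values count from the end;
--     an out-of-range position raises IndexError.
--     """
--     n = len(sequence)
--     masked = {range(n)[pos] for pos in positions}  # normalizes each index, IndexError if out of range
--     return ''.join('<mask>' if i in masked else ch for i, ch in enumerate(sequence))
-- ===== Notes on version B (the rewrite author's own statement) =====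
-- stated objective: idiomatic
-- what changed: B builds the set of normalized masked indices once (range(n)[pos] per position) and then emits the result in a single pass over the sequence with enumerate and a membership test, instead of A's in-place mutation of a character list at each position.
import Mathlib
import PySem

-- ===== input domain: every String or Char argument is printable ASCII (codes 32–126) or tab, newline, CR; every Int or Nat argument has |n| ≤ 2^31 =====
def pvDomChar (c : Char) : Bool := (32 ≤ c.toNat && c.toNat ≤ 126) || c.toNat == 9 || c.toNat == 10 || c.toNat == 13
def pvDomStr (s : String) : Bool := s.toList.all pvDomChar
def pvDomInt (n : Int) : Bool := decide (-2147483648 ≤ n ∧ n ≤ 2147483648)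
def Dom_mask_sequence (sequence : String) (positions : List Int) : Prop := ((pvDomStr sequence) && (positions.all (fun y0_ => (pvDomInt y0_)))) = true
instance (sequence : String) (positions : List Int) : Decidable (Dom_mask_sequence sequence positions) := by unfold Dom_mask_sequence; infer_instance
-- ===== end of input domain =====

-- B builds the set of normalized masked indices once (range(n)[pos] per position) and emits the
-- result in one pass over the sequence with enumerate + membership test, instead of A's
-- per-position mutation of a character list (objective: idiomatic; same cost).

-- ===== PORT A =====
-- the loop 'for pos in positions: if pos < len: sequence_list[pos] = "<mask>" else raise';
-- none = the IndexError (from the explicit raise or from the list assignment)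
def maskLoopA (l : List String) (ps : List Int) : Option (List String) :=
  match ps with
  | [] => some l
  | p :: ps' =>
    if p < PySem.List.len l then
      match PySem.List.pySet? l p "<mask>" with
      | some l' => maskLoopA l' ps'
      | none => none
    else none

def mask_sequence (sequence : String) (positions : List Int) : String :=
  match maskLoopA (sequence.toList.map (fun c => String.ofList [c])) positions with
  | some l => PySem.Str.join "" l
  | none => ""  -- Python raises IndexError here; excluded by Pre_

-- ===== PORT B =====
-- the set comprehension '{range(n)[pos] for pos in positions}';
-- none = the IndexError raised by range(n)[pos] for an out-of-range pos
def maskLoopB (n : Int) (ps : List Int) (s : PySem.Set Int) : Option (PySem.Set Int) :=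
  match ps with
  | [] => some s
  | p :: ps' =>
    match PySem.List.pyGet? (PySem.List.pyRange 0 n 1) p with
    | some i => maskLoopB n ps' (PySem.Set.add s i)
    | none => none

def mask_sequence_alt (sequence : String) (positions : List Int) : String :=
  -- n = len(sequence)
  match maskLoopB (PySem.Str.len sequence) positions PySem.Set.empty with
  | some s =>
      PySem.Str.join "" ((PySem.List.enumerate sequence.toList).map
        (fun ic => if PySem.Set.contains s ic.1 then "<mask>" else String.ofList [ic.2]))
  | none => ""  -- Python raises IndexError here; excluded by Pre_

-- ===== PRECONDITION & SPEC =====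
-- Pre_ excludes exactly the inputs on which BOTH Pythons raise IndexError: some position
-- out of range (pos ≥ len or pos < -len).
def Pre_mask_sequence (sequence : String) (positions : List Int) : Prop :=
  ∀ p ∈ positions, -(sequence.toList.length : Int) ≤ p ∧ p < (sequence.toList.length : Int)
instance (sequence : String) (positions : List Int) : Decidable (Pre_mask_sequence sequence positions) := by unfold Pre_mask_sequence; infer_instance

def pvWitness_mask_sequence : String × List Int := ("ACGU", [1, -1, 1])

def Spec_mask_sequence (sequence : String) (positions : List Int) (out : String) : Prop := out = mask_sequence_alt sequence positions
instance (sequence : String) (positions : List Int) (out : String) : Decidable (Spec_mask_sequence sequence positions out) := by unfold Spec_mask_sequence; infer_instance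

-- ===== CLAIM (what is proved, stated in full; the proofs are below) =====
def Claim_equal_mask_sequence : Prop := ∀ (sequence : String) (positions : List Int), Dom_mask_sequence sequence positions → Pre_mask_sequence sequence positions → Spec_mask_sequence sequence positions (mask_sequence sequence positions)

-- ===== LEMMAS AND PROOFS =====

-- normalized (Python wrap-around) index
def pvNormI (n : Nat) (p : Int) : Int := if p ≥ 0 then p else p + n

theorem pySet?_eq_some_norm (l : List String) (p : Int) (v : String)
    (h1 : -(l.length : Int) ≤ p) (h2 : p < (l.length : Int)) :
    PySem.List.pySet? l p v = some (l.set (pvNormI l.length p).toNat v) := by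
  simp only [PySem.List.pySet?, PySem.List.pyIdx?, pvNormI]
  split_ifs <;> simp_all
  congr 1
  omega

theorem pySetD_eq_set_norm (l : List String) (p : Int) (v : String)
    (h1 : -(l.length : Int) ≤ p) (h2 : p < (l.length : Int)) :
    PySem.List.pySetD l p v = l.set (pvNormI l.length p).toNat v := by
  simp [PySem.List.pySetD, pySet?_eq_some_norm l p v h1 h2]

theorem loopA_eq_foldl (ps : List Int) (l : List String)
    (h : ∀ p ∈ ps, -(l.length : Int) ≤ p ∧ p < (l.length : Int)) :
    maskLoopA l ps = some (ps.foldl (fun l p => PySem.List.pySetD l p "<mask>") l) := by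
  induction ps generalizing l with
  | nil => rfl
  | cons p ps ih =>
    obtain ⟨h1, h2⟩ := h p (List.mem_cons_self ..)
    simp only [maskLoopA, PySem.List.len_eq, if_pos h2,
      pySet?_eq_some_norm l p "<mask>" h1 h2, List.foldl_cons]
    rw [← pySetD_eq_set_norm l p "<mask>" h1 h2]
    exact ih _ (by intro q hq; simpa [PySem.List.length_pySetD] using h q (List.mem_cons_of_mem _ hq))

theorem getElem?_foldl_setD (ps : List Int) (l : List String) (k : Nat)
    (h : ∀ p ∈ ps, -(l.length : Int) ≤ p ∧ p < (l.length : Int)) :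
    (ps.foldl (fun l p => PySem.List.pySetD l p "<mask>") l)[k]? =
      if ∃ p ∈ ps, pvNormI l.length p = (k : Int) then
        (if k < l.length then some "<mask>" else none)
      else l[k]? := by
  induction ps generalizing l with
  | nil => simp
  | cons p ps ih =>
    obtain ⟨h1, h2⟩ := h p (List.mem_cons_self ..)
    have hnorm : 0 ≤ pvNormI l.length p ∧ pvNormI l.length p < (l.length : Int) := by
      unfold pvNormI; split_ifs <;> omega
    have hlen : (PySem.List.pySetD l p "<mask>").length = l.length := PySem.List.length_pySetD ..
    rw [List.foldl_cons, ih _ (by intro q hq; rw [hlen]; exact h q (List.mem_cons_of_mem _ hq))]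
    rw [hlen, pySetD_eq_set_norm l p "<mask>" h1 h2, List.getElem?_set]
    by_cases hex : ∃ q ∈ ps, pvNormI l.length q = (k : Int)
    · simp [hex, List.mem_cons]
    · by_cases hp : pvNormI l.length p = (k : Int)
      · have ht : (pvNormI l.length p).toNat = k := by omega
        simp [hex, hp]
      · have hne : ¬ (pvNormI l.length p).toNat = k := by omega
        have hcons : ¬ ∃ q ∈ p :: ps, pvNormI l.length q = (k : Int) := by
          rintro ⟨q, hq, hqe⟩
          rcases List.mem_cons.mp hq with rfl | hq'
          · exact hp hqe
          · exact hex ⟨q, hq', hqe⟩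
        simp [hex, hne]
        exact fun hc => absurd hc hp

-- range(n)[p] = the normalized index, for an in-range p
theorem pyGet?_pyRange_norm (n p : Int) (h1 : -n ≤ p) (h2 : p < n) :
    PySem.List.pyGet? (PySem.List.pyRange 0 n 1) p = some (if p ≥ 0 then p else p + n) := by
  have hn : 0 < n := by omega
  have hlen : (PySem.List.pyRange 0 n 1).length = n.toNat := by
    simpa using PySem.List.length_pyRange_one 0 n
  by_cases hp : p ≥ 0
  · rw [if_pos hp, PySem.List.pyGet?_of_nonneg (h := hp)]
    rw [List.getElem?_eq_getElem (by omega)]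
    rw [PySem.List.getElem_pyRange_one]
    simp
    omega
  · rw [if_neg hp]
    have hk : p = -(((-p).toNat : Nat) : Int) := by omega
    rw [hk, PySem.List.pyGet?_neg_natCast _ _ (by omega) (by omega)]
    rw [List.getElem?_eq_getElem (by omega)]
    rw [PySem.List.getElem_pyRange_one]
    simp
    omega

theorem loopB_eq_foldl (n : Int) (ps : List Int) (s : PySem.Set Int)
    (h : ∀ p ∈ ps, -n ≤ p ∧ p < n) :
    maskLoopB n ps s = some (ps.foldl (fun s p => PySem.Set.add s (if p ≥ 0 then p else p + n)) s) := by
  induction ps generalizing s with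
  | nil => rfl
  | cons p ps ih =>
    obtain ⟨h1, h2⟩ := h p (List.mem_cons_self ..)
    simp only [maskLoopB, List.foldl_cons, pyGet?_pyRange_norm n p h1 h2]
    exact ih _ (fun q hq => h q (List.mem_cons_of_mem _ hq))

-- ===== VERDICT (by name: the statement is the Claim_ definition above) =====
theorem mask_sequence_spec : Claim_equal_mask_sequence := by
  intro seq ps _hdom hpre
  unfold Spec_mask_sequence mask_sequence mask_sequence_alt
  set xs := seq.toList with hxs
  set l0 : List String := xs.map (fun c => String.ofList [c]) with hl0
  have hlen0 : l0.length = xs.length := List.length_map ..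
  have hN : PySem.Str.len seq = (xs.length : Int) := by simp [PySem.Str.len, hxs]
  have hpre' : ∀ p ∈ ps, -(l0.length : Int) ≤ p ∧ p < (l0.length : Int) := by
    intro p hp; rw [hlen0]; exact hpre p hp
  rw [loopA_eq_foldl ps l0 hpre', hN,
    loopB_eq_foldl (xs.length : Int) ps PySem.Set.empty (fun p hp => hpre p hp)]
  simp only
  congr 1
  set f : Int → Int := fun p => if p ≥ 0 then p else p + (xs.length : Int) with hf
  have hset : (ps.foldl (fun s p => PySem.Set.add s (if p ≥ 0 then p else p + (xs.length : Int))) PySem.Set.empty)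
      = PySem.Set.ofList (ps.map f) := by
    rw [← PySem.Set.update_map_eq_foldl_add, PySem.Set.update_empty]
  rw [hset]
  apply List.ext_getElem?
  intro k
  rw [getElem?_foldl_setD ps l0 k hpre']
  conv_rhs => rw [List.getElem?_map, PySem.List.getElem?_enumerate, Option.map_map]
  have hnorm : ∀ p, pvNormI xs.length p = f p := by
    intro p; simp [pvNormI, hf]
  simp only [hlen0, hnorm]
  have hmem : (PySem.Set.ofList (ps.map f)).contains ((0 : Int) + (k : Int))
      = decide (∃ p ∈ ps, f p = (k : Int)) := by
    rw [Bool.eq_iff_iff]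
    simp [PySem.Set.contains, PySem.Set.mem_ofList, List.mem_map]
  by_cases hk : k < xs.length
  · have hc : xs[k]? = some xs[k] := List.getElem?_eq_some_iff.mpr ⟨hk, rfl⟩
    have hc0 : l0[k]? = some (String.ofList [xs[k]]) := by
      rw [hl0, List.getElem?_map, hc]; rfl
    rw [hc, hc0]
    simp only [Option.map_some]
    by_cases hex : ∃ p ∈ ps, f p = (k : Int)
    · simp [hex, hk]
    · simp [hex]
  · have h1 : xs[k]? = none := by rw [List.getElem?_eq_none_iff]; omega
    have h2 : l0[k]? = none := by rw [List.getElem?_eq_none_iff]; omega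
    rw [h1, h2]
    simp [hk]
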